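-- pv_equiv track=rewrite | github.com/ontologymerging/NoisyOntologyMerging | MergingNoisyOntology_Semantic-Based/Cluster_NoisyTree_MergingOntologies_ver7.py | FilterSubsumption_NotIn_OriginalTree
-- ===== SOURCE A (Python) =====
-- def FilterSubsumption_NotIn_OriginalTree(ListOfChildToRoot, List_SubsumptionResult):
--     ListOfSubsumption_Result_Changed = []
--     for each in List_SubsumptionResult:
--         flag = 1
--         for eachbranchOfTree in ListOfChildToRoot:
--             if each[0] in eachbranchOfTree and each[1] in eachbranchOfTree:
--                 flag = 0
--                 # break
--         if flag == 1:
--             ListOfSubsumption_Result_Changed.append(each)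
--     return ListOfSubsumption_Result_Changed
-- ===== SOURCE B (Python) =====
-- def FilterSubsumption_NotIn_OriginalTree(ListOfChildToRoot, List_SubsumptionResult):
--     # Index each node to the set of branch indices it occurs in; a pair is kept
--     # iff its endpoints' branch-index sets are disjoint.
--     branches_of = {}
--     for i, branch in enumerate(ListOfChildToRoot):
--         for node in branch:
--             branches_of.setdefault(node, set()).add(i)
--     empty = set()
--     result = []
--     for pair in List_SubsumptionResult:
--         if branches_of.get(pair[0], empty) & branches_of.get(pair[1], empty):
--             continue
--         result.append(pair)
--     return result
-- ===== Notes on version B (the rewrite author's own statement) =====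
-- stated objective: faster
-- what changed: Instead of rescanning every branch list per pair with linear membership tests, B builds once a node-to-set-of-branch-indices index and keeps a pair iff the two index sets are disjoint.
import Mathlib
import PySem

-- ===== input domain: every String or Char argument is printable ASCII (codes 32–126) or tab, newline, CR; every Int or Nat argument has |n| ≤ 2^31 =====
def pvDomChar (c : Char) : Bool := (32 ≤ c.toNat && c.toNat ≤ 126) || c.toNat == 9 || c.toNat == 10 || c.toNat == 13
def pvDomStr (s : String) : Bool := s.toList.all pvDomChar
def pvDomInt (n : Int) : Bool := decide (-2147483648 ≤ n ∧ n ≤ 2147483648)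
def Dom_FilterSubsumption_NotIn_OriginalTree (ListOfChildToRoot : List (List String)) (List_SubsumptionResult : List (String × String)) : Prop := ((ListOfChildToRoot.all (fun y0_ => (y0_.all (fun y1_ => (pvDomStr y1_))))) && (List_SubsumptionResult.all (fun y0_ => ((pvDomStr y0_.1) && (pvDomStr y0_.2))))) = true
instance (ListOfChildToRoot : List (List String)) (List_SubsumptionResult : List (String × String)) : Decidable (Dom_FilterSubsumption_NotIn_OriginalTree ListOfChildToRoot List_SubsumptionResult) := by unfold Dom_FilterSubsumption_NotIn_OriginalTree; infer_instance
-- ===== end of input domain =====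

-- B replaces A's per-pair rescan of every branch by a node→branch-index-set index
-- built once, testing each pair by set intersection (objective: faster).

-- ===== PORT A =====
-- for each pair: scan every branch; flag drops to 0 when a branch contains both ends;
-- keep the pair when flag stayed 1.
def FilterSubsumption_NotIn_OriginalTree (ListOfChildToRoot : List (List String)) (List_SubsumptionResult : List (String × String)) : List (String × String) :=
  List_SubsumptionResult.foldl
    (fun acc each =>
      let flag : Int :=
        ListOfChildToRoot.foldl
          (fun flag eachbranchOfTree =>
            if eachbranchOfTree.contains each.1 && eachbranchOfTree.contains each.2 then 0 else flag)
          1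
      if flag = 1 then acc ++ [each] else acc)
    []

-- ===== PORT B =====
-- branches_of: node → set of indices of the branches containing it (setdefault/add loop)
def pvBranchesOf (ListOfChildToRoot : List (List String)) : PySem.Dict String (PySem.Set Int) :=
  (PySem.List.enumerate ListOfChildToRoot 0).foldl
    (fun d p => p.2.foldl (fun d node => d.insert node ((d.getD node PySem.Set.empty).add p.1)) d)
    PySem.Dict.empty

def FilterSubsumption_NotIn_OriginalTree_alt (ListOfChildToRoot : List (List String)) (List_SubsumptionResult : List (String × String)) : List (String × String) :=
  let branches_of := pvBranchesOf ListOfChildToRoot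
  List_SubsumptionResult.foldl
    (fun result pair =>
      if PySem.Set.inter (branches_of.getD pair.1 PySem.Set.empty) (branches_of.getD pair.2 PySem.Set.empty) ≠ [] then
        result
      else result ++ [pair])
    []

-- ===== PRECONDITION & SPEC =====
def Spec_FilterSubsumption_NotIn_OriginalTree (ListOfChildToRoot : List (List String)) (List_SubsumptionResult : List (String × String)) (out : List (String × String)) : Prop := out = FilterSubsumption_NotIn_OriginalTree_alt ListOfChildToRoot List_SubsumptionResult
instance (ListOfChildToRoot : List (List String)) (List_SubsumptionResult : List (String × String)) (out : List (String × String)) : Decidable (Spec_FilterSubsumption_NotIn_OriginalTree ListOfChildToRoot List_SubsumptionResult out) := by unfold Spec_FilterSubsumption_NotIn_OriginalTree; infer_instance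

-- ===== CLAIM (what is proved, stated in full; the proofs are below) =====
def Claim_equal_FilterSubsumption_NotIn_OriginalTree : Prop := ∀ (ListOfChildToRoot : List (List String)) (List_SubsumptionResult : List (String × String)), Dom_FilterSubsumption_NotIn_OriginalTree ListOfChildToRoot List_SubsumptionResult → Spec_FilterSubsumption_NotIn_OriginalTree ListOfChildToRoot List_SubsumptionResult (FilterSubsumption_NotIn_OriginalTree ListOfChildToRoot List_SubsumptionResult)

-- ===== LEMMAS AND PROOFS =====

-- A's inner loop: the flag ends at 0 iff some branch contains both endpoints.
theorem pvFlag_eq (L : List (List String)) (a b : String) (init : Int) :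
    L.foldl (fun flag br => if br.contains a && br.contains b then 0 else flag) init
      = if L.any (fun br => br.contains a && br.contains b) then 0 else init := by
  induction L generalizing init with
  | nil => simp
  | cons br L ih =>
    simp only [List.foldl_cons, List.any_cons, ih]
    split_ifs <;> (try simp_all) <;> (try tauto)

-- getD after the inner node loop of one branch
theorem pvMem_getD_step (br : List String) (d : PySem.Dict String (PySem.Set Int))
    (i : Int) (x : String) (j : Int) :
    (j ∈ (br.foldl (fun d node => d.insert node ((d.getD node PySem.Set.empty).add i)) d).getD x PySem.Set.empty)
      ↔ j ∈ d.getD x PySem.Set.empty ∨ (j = i ∧ br.contains x) := by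
  induction br generalizing d with
  | nil => simp
  | cons n br ih =>
    simp only [List.foldl_cons, ih, List.contains_cons]
    rw [PySem.Dict.getD_insert]
    by_cases hn : x = n
    · subst hn
      rw [if_pos rfl]
      simp only [PySem.Set.mem_add, beq_self_eq_true, Bool.true_or, and_true]
      tauto
    · rw [if_neg hn]
      have hb : (x == n) = false := by simp [hn]
      simp [hb]

-- membership characterisation of the node→branch-indices index, for any start/accumulator
theorem pvMem_branchesOf (L : List (List String)) (s : Int)
    (d : PySem.Dict String (PySem.Set Int)) (x : String) (j : Int) :
    (j ∈ ((PySem.List.enumerate L s).foldl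
        (fun d p => p.2.foldl (fun d node => d.insert node ((d.getD node PySem.Set.empty).add p.1)) d) d).getD x PySem.Set.empty)
      ↔ j ∈ d.getD x PySem.Set.empty
        ∨ ∃ k : Nat, ∃ hk : k < L.length, j = s + k ∧ (L[k]'hk).contains x := by
  induction L generalizing s d with
  | nil => simp [PySem.List.enumerate_nil]
  | cons br L ih =>
    rw [PySem.List.enumerate_cons]
    simp only [List.foldl_cons, ih, pvMem_getD_step]
    constructor
    · rintro ((h | ⟨rfl, hc⟩) | ⟨k, hk, rfl, hm⟩)
      · exact Or.inl h
      · exact Or.inr ⟨0, by simp, by simp, by simpa using hc⟩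
      · exact Or.inr ⟨k + 1, by simp only [List.length_cons]; omega,
          by push_cast; ring, by simpa using hm⟩
    · rintro (h | ⟨k, hk, hj, hm⟩)
      · exact Or.inl (Or.inl h)
      · cases k with
        | zero => exact Or.inl (Or.inr ⟨by simpa using hj, by simpa using hm⟩)
        | succ k =>
          have hk' : k < L.length := by simp only [List.length_cons] at hk; omega
          refine Or.inr ⟨k, hk', ?_, by simpa using hm⟩
          push_cast at hj ⊢
          omega

theorem pvMem_branchesOf_index (L : List (List String)) (x : String) (j : Int) :
    (j ∈ (pvBranchesOf L).getD x PySem.Set.empty)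
      ↔ ∃ k : Nat, ∃ hk : k < L.length, j = (k : Int) ∧ (L[k]'hk).contains x := by
  unfold pvBranchesOf
  rw [pvMem_branchesOf]
  simp

-- B's per-pair disjointness test agrees with A's any-branch test
theorem pvInter_iff (L : List (List String)) (a b : String) :
    (PySem.Set.inter ((pvBranchesOf L).getD a PySem.Set.empty) ((pvBranchesOf L).getD b PySem.Set.empty) ≠ [])
      ↔ L.any (fun br => br.contains a && br.contains b) := by
  unfold PySem.Set.inter
  rw [Ne, List.filter_eq_nil_iff]
  constructor
  · intro h
    rw [not_forall] at h
    obtain ⟨j, hj⟩ := h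
    rw [Classical.not_imp, not_not] at hj
    obtain ⟨hja, hjb⟩ := hj
    have hjb' : j ∈ (pvBranchesOf L).getD b PySem.Set.empty := by
      simpa using hjb
    rw [pvMem_branchesOf_index] at hja
    obtain ⟨k, hk, rfl, hak⟩ := hja
    rw [pvMem_branchesOf_index] at hjb'
    obtain ⟨k', hk', he, hbk⟩ := hjb'
    have hkk : k = k' := by exact_mod_cast he
    subst hkk
    refine List.any_eq_true.mpr ⟨L[k], List.getElem_mem hk, ?_⟩
    rw [Bool.and_eq_true]
    exact ⟨hak, hbk⟩
  · intro h hnone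
    obtain ⟨br, hbr, hab⟩ := List.any_eq_true.mp h
    obtain ⟨k, hk, rfl⟩ := List.getElem_of_mem hbr
    simp only [Bool.and_eq_true] at hab
    have hka : ((k : Nat) : Int) ∈ (pvBranchesOf L).getD a PySem.Set.empty :=
      (pvMem_branchesOf_index L a k).mpr ⟨k, hk, rfl, hab.1⟩
    have hkb : ((k : Nat) : Int) ∈ (pvBranchesOf L).getD b PySem.Set.empty :=
      (pvMem_branchesOf_index L b k).mpr ⟨k, hk, rfl, hab.2⟩
    have hnb := hnone _ hka
    simp at hnb
    exact hnb hkb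

-- ===== VERDICT (by name: the statement is the Claim_ definition above) =====
theorem FilterSubsumption_NotIn_OriginalTree_spec : Claim_equal_FilterSubsumption_NotIn_OriginalTree := by
  intro L S hD
  clear hD
  unfold Spec_FilterSubsumption_NotIn_OriginalTree
  unfold FilterSubsumption_NotIn_OriginalTree FilterSubsumption_NotIn_OriginalTree_alt
  simp only [pvFlag_eq]
  induction S using List.reverseRecOn with
  | nil => rfl
  | append_singleton S p ih =>
    rw [List.foldl_append, List.foldl_append, ← ih]
    simp only [List.foldl_cons, List.foldl_nil]
    by_cases h : L.any (fun br => br.contains p.1 && br.contains p.2) = true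
    · have h2 : PySem.Set.inter ((pvBranchesOf L).getD p.1 PySem.Set.empty)
          ((pvBranchesOf L).getD p.2 PySem.Set.empty) ≠ [] := (pvInter_iff L p.1 p.2).mpr h
      rw [if_pos h, if_neg (by norm_num : ¬(0 : Int) = 1), if_pos h2]
    · have h2 : PySem.Set.inter ((pvBranchesOf L).getD p.1 PySem.Set.empty)
          ((pvBranchesOf L).getD p.2 PySem.Set.empty) = [] := by
        by_contra hc
        exact h ((pvInter_iff L p.1 p.2).mp hc)
      rw [if_neg h, if_pos rfl, if_neg (not_not_intro h2)]
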